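-- pv_equiv track=rewrite | github.com/MrBrantCode/unitest_baseline | mut_generate/mist_train_cf/cf_7121/solution.py | get_last_two_odd_primes
-- ===== SOURCE A (Python) =====
-- def get_last_two_odd_primes(arr):
--     def is_prime(num):
--         if num < 2:
--             return False
--         for i in range(2, int(num**0.5) + 1):
--             if num % i == 0:
--                 return False
--         return True
--
--     primes = []
--     for num in arr[::-1]:
--         if num % 2 != 0 and is_prime(num):
--             primes.append(num)
--             if len(primes) == 2:
--                 break
--     primes.reverse()
--     return primes
-- ===== SOURCE B (Python) =====
-- def get_last_two_odd_primes(arr):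
--     def is_prime(num):
--         if num < 2:
--             return False
--         for i in range(2, int(num**0.5) + 1):
--             if num % i == 0:
--                 return False
--         return True
--
--     odd_primes = [num for num in arr if num % 2 != 0 and is_prime(num)]
--     return odd_primes[-2:]
-- ===== Notes on version B (the rewrite author's own statement) =====
-- stated objective: simpler
-- what changed: Replaces A's reverse-pass with append/break-at-two and final reverse by a single forward filter of all odd primes followed by a [-2:] slice.
import Mathlib
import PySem

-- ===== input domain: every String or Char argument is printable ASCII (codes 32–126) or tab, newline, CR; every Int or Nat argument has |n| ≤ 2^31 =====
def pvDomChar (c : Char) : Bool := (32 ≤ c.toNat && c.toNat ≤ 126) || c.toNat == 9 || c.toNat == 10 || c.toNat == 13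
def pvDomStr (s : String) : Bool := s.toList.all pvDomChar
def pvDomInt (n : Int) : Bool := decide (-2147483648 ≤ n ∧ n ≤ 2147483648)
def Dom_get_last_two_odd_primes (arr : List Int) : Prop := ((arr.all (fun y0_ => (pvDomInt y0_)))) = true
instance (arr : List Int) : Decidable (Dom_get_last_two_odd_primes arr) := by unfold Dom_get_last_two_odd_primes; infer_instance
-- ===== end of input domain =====

-- ===== PORT A =====
-- B changes: forward filter of all odd primes + [-2:] slice instead of A's reverse scan with break-at-two and final reverse (objective: simpler).
-- is_prime helper, identical in A's and B's Python. int(num**0.5) is ported as Nat.sqrt num.toNat,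
-- exact for 0 <= num <= 2^31 (double sqrt is correctly rounded, so int(num**0.5) = isqrt(num) there).
def pvIsPrimeLoop (num : Int) (l : List Int) : Bool :=
  match l with
  | [] => true
  | i :: rest => if PySem.Int.mod num i = 0 then false else pvIsPrimeLoop num rest

def pvIsPrime (num : Int) : Bool :=
  if num < 2 then false
  else pvIsPrimeLoop num (PySem.List.pyRange 2 ((Nat.sqrt num.toNat : Int) + 1) 1)

-- A's loop over arr[::-1] with break once two primes are collected
def pvLoopA (l : List Int) (primes : List Int) : List Int :=
  match l with
  | [] => primes
  | num :: rest =>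
    if PySem.Int.mod num 2 != 0 && pvIsPrime num then
      let primes' := primes ++ [num]
      if primes'.length = 2 then primes' else pvLoopA rest primes'
    else pvLoopA rest primes

-- arr[::-1] = arr.reverse (PySem.List.slice?_none_none_neg_one); primes.reverse() at the end
def get_last_two_odd_primes (arr : List Int) : List Int :=
  (pvLoopA arr.reverse []).reverse

-- ===== PORT B =====
def get_last_two_odd_primes_alt (arr : List Int) : List Int :=
  let odd_primes := arr.filter (fun num => PySem.Int.mod num 2 != 0 && pvIsPrime num)
  PySem.List.slice odd_primes (some (-2)) none

-- ===== PRECONDITION & SPEC =====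
def Spec_get_last_two_odd_primes (arr : List Int) (out : List Int) : Prop := out = get_last_two_odd_primes_alt arr
instance (arr : List Int) (out : List Int) : Decidable (Spec_get_last_two_odd_primes arr out) := by unfold Spec_get_last_two_odd_primes; infer_instance

-- ===== CLAIM (what is proved, stated in full; the proofs are below) =====
def Claim_equal_get_last_two_odd_primes : Prop := ∀ (arr : List Int), Dom_get_last_two_odd_primes arr → Spec_get_last_two_odd_primes arr (get_last_two_odd_primes arr)

-- ===== LEMMAS AND PROOFS =====
-- A's loop, started with fewer than two collected primes, returns the accumulator
-- followed by the first (2 - |acc|) odd primes of l.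
theorem pvLoopA_eq (l : List Int) (acc : List Int) (h : acc.length < 2) :
    pvLoopA l acc =
      acc ++ (l.filter (fun num => PySem.Int.mod num 2 != 0 && pvIsPrime num)).take (2 - acc.length) := by
  induction l generalizing acc with
  | nil => rw [pvLoopA, List.filter_nil, List.take_nil, List.append_nil]
  | cons num rest ih =>
    rw [pvLoopA, List.filter_cons]
    by_cases hp : (PySem.Int.mod num 2 != 0 && pvIsPrime num) = true
    · rw [if_pos hp, if_pos hp]
      by_cases h2 : (acc ++ [num]).length = 2
      · rw [if_pos h2]
        have h1 : 2 - acc.length = 1 := by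
          rw [List.length_append, List.length_singleton] at h2; omega
        rw [h1, List.take_succ_cons, List.take_zero]
      · rw [if_neg h2]
        have h0 : acc = [] := by
          rw [List.length_append, List.length_singleton] at h2
          exact List.eq_nil_of_length_eq_zero (by omega)
        subst h0
        rw [ih _ (by simp), List.nil_append, List.nil_append, List.length_nil,
          List.length_singleton, List.singleton_append, List.take_succ_cons]
    · rw [if_neg hp, if_neg hp]
      exact ih acc h

-- ===== VERDICT (by name: the statement is the Claim_ definition above) =====
theorem get_last_two_odd_primes_spec : Claim_equal_get_last_two_odd_primes := by
  intro arr _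
  unfold Spec_get_last_two_odd_primes get_last_two_odd_primes get_last_two_odd_primes_alt
  rw [pvLoopA_eq _ _ (by simp), PySem.List.slice_from_neg_ofNat _ 2 (by omega),
    List.nil_append, List.filter_reverse, List.take_reverse, List.reverse_reverse, List.length_nil]
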